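-- pv_equiv track=rewrite | github.com/sjf/project_euler | q032.py | eligible
-- ===== SOURCE A (Python) =====
-- def eligible(a,b,c):
--   digits = {}
--   if has_dups(a, digits):
--     return False
--   if has_dups(b, digits):
--     return False
--   if has_dups(c, digits):
--     return False
--   if 0 in digits:
--     return False
--   for i in range(1,10):
--     if i not in digits:
--       return False
--   return True
--
-- def has_dups(n, digits=None):
--   if n == 0:
--     return True
--   if digits is None:
--     digits = {}
--   while n:
--     d = n%10
--     n = int(n/10)
--     if d in digits:
--       return True
--     digits[d] = 1
--   return False
-- ===== SOURCE B (Python) =====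
-- def eligible(a, b, c):
--   # simpler: one digit list + a single sorted-compare against [1..9]
--   if a == 0 or b == 0 or c == 0:
--     return False
--   ds = []
--   for n in (a, b, c):
--     while n:
--       ds.append(n % 10)
--       n = int(n / 10)
--   return sorted(ds) == [1, 2, 3, 4, 5, 6, 7, 8, 9]
-- ===== Notes on version B (the rewrite author's own statement) =====
-- stated objective: simpler
-- what changed: Replaces the shared mutable duplicate-detecting dict with its early returns and the separate 0-membership and 1..9 presence loops by collecting all digits into one list and comparing its sorted form to [1..9], which enforces no-duplicates, no-zero and full 1..9 presence in a single check.
import Mathlib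
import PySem

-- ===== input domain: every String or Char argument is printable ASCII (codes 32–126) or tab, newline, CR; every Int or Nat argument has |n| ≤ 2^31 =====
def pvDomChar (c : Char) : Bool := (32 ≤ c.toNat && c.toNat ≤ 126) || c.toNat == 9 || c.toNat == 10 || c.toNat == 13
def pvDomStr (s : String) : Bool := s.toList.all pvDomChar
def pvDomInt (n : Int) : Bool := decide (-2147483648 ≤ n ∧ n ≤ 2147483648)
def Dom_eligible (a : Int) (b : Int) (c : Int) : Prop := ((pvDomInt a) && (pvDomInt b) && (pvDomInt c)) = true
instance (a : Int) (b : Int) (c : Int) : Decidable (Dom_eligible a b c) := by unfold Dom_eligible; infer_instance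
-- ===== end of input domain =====

-- B replaces A's shared duplicate-detecting dict and separate 0/1..9 presence loops by one
-- sorted digit-list compare against [1..9] (objective: simpler).


-- termination helper shared by both ports: int(n/10) (Python truncating division, exact for |n| ≤ 2^31) shrinks |n|
theorem pvTdivTenLt (n : Int) (h : ¬ n = 0) : (n.tdiv 10).natAbs < n.natAbs := by
  rw [Int.natAbs_tdiv]
  exact Nat.div_lt_self (Int.natAbs_pos.mpr h) (by norm_num)

-- ===== PORT A =====
-- the `while n:` loop of has_dups, with the shared mutable dict threaded through;
-- `n % 10` is Python floor mod, `int(n/10)` is truncating division (exact for |n| ≤ 2^31)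
def pvHasDupsLoop (n : Int) (digits : PySem.Dict Int Int) : Bool × PySem.Dict Int Int :=
  if _h : n = 0 then (false, digits)
  else
    let d := PySem.Int.mod n 10
    if digits.contains d then (true, digits)
    else pvHasDupsLoop (n.tdiv 10) (digits.insert d 1)
termination_by n.natAbs
decreasing_by exact pvTdivTenLt n _h

def pvHasDups (n : Int) (digits : PySem.Dict Int Int) : Bool × PySem.Dict Int Int :=
  if n = 0 then (true, digits) else pvHasDupsLoop n digits

def eligible (a : Int) (b : Int) (c : Int) : Bool :=
  let r1 := pvHasDups a (PySem.Dict.empty)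
  if r1.1 then false else
  let r2 := pvHasDups b r1.2
  if r2.1 then false else
  let r3 := pvHasDups c r2.2
  if r3.1 then false else
  if r3.2.contains 0 then false else
  (PySem.List.pyRange 1 10 1).all (fun i => r3.2.contains i)

-- ===== PORT B =====
-- the digit-collecting `while n:` loop of Source B (same extraction arithmetic as A)
def pvDigits (n : Int) : List Int :=
  if _h : n = 0 then [] else PySem.Int.mod n 10 :: pvDigits (n.tdiv 10)
termination_by n.natAbs
decreasing_by exact pvTdivTenLt n _h

def eligible_alt (a : Int) (b : Int) (c : Int) : Bool :=
  if a = 0 || b = 0 || c = 0 then false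
  else
    let ds := [a, b, c].foldl (fun acc n => acc ++ pvDigits n) []
    decide (PySem.List.sorted ds (fun x => x) false = [1, 2, 3, 4, 5, 6, 7, 8, 9])

-- ===== PRECONDITION & SPEC =====
def Spec_eligible (a : Int) (b : Int) (c : Int) (out : Bool) : Prop := out = eligible_alt a b c
instance (a : Int) (b : Int) (c : Int) (out : Bool) : Decidable (Spec_eligible a b c out) := by unfold Spec_eligible; infer_instance

-- ===== CLAIM (what is proved, stated in full; the proofs are below) =====
def Claim_equal_eligible : Prop := ∀ (a : Int) (b : Int) (c : Int), Dom_eligible a b c → Spec_eligible a b c (eligible a b c)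

-- ===== LEMMAS AND PROOFS =====

theorem pvMemDigits_bounds (n d : Int) (h : d ∈ pvDigits n) : 0 ≤ d ∧ d < 10 := by
  fun_induction pvDigits n with
  | case1 => simp at h
  | case2 n hn ih =>
    rcases List.mem_cons.mp h with h1 | h2
    · subst h1
      rw [PySem.Int.mod_eq_emod_of_pos (by norm_num : (0:Int) < 10)]
      exact ⟨Int.emod_nonneg n (by norm_num), Int.emod_lt_of_pos n (by norm_num)⟩
    · exact ih h2

-- invariant of A's while loop: it reports false exactly when the digits of n (in B's sense)
-- are fresh and duplicate-free, and then the dict has gained exactly those digits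
theorem pvLoopSpec (n : Int) (dict : PySem.Dict Int Int) :
    ((pvHasDupsLoop n dict).1 = false ↔
      (pvDigits n).Nodup ∧ ∀ d ∈ pvDigits n, dict.contains d = false) ∧
    ((pvHasDupsLoop n dict).1 = false →
      ∀ x, (pvHasDupsLoop n dict).2.contains x = (dict.contains x || decide (x ∈ pvDigits n))) := by
  fun_induction pvHasDupsLoop n dict with
  | case1 digits =>
    simp [pvDigits]
  | case2 n digits hn d hc =>
    constructor
    · constructor
      · intro h; simp at h
      · rintro ⟨-, hall⟩
        have hm : d ∈ pvDigits n := by rw [pvDigits]; simp [hn, d]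
        have h2 := hall _ hm
        rw [hc] at h2
        exact absurd h2 (by simp)
    · intro h; simp at h
  | case3 n digits hn d hc ih =>
    obtain ⟨ih1, ih2⟩ := ih
    have hdig : pvDigits n = d :: pvDigits (n.tdiv 10) := by rw [pvDigits]; simp [hn, d]
    rw [hdig]
    constructor
    · rw [ih1]
      constructor
      · rintro ⟨hnd, hall⟩
        have hnotmem : d ∉ pvDigits (n.tdiv 10) := by
          intro hm
          have := hall _ hm
          rw [PySem.Dict.contains_insert] at this
          simp at this
        refine ⟨List.nodup_cons.mpr ⟨hnotmem, hnd⟩, ?_⟩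
        intro x hx
        rcases List.mem_cons.mp hx with h1 | h2
        · subst h1; simpa using hc
        · have := hall x h2
          rw [PySem.Dict.contains_insert] at this
          simp only [Bool.or_eq_false_iff] at this
          exact this.2
      · rintro ⟨hnd, hall⟩
        have hnotmem := (List.nodup_cons.mp hnd).1
        refine ⟨(List.nodup_cons.mp hnd).2, ?_⟩
        intro x hx
        rw [PySem.Dict.contains_insert]
        have hne : x ≠ d := fun he => hnotmem (he ▸ hx)
        simp only [Bool.or_eq_false_iff]
        exact ⟨by simpa using hne, hall x (List.mem_cons_of_mem _ hx)⟩
    · intro hf x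
      rw [ih2 hf x, PySem.Dict.contains_insert]
      by_cases hx : x = d
      · simp [hx]
      · have hb : (x == d) = false := beq_eq_false_iff_ne.mpr hx
        rw [hb]
        simp [hx, List.mem_cons]

-- sorted ds = [1..9] iff ds is a permutation of [1..9]
theorem pvSortedNine (ds : List Int) :
    PySem.List.sorted ds (fun x => x) false = [1, 2, 3, 4, 5, 6, 7, 8, 9] ↔
      ds.Perm [1, 2, 3, 4, 5, 6, 7, 8, 9] := by
  constructor
  · intro h
    have := PySem.List.sorted_perm ds (fun x => x) false
    rw [h] at this
    exact this.symm
  · intro h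
    exact PySem.List.sorted_eq_of_perm_of_pairwise_lt _ _ _ h.symm (by decide)

theorem pvPermNine (L : List Int) (hb : ∀ d ∈ L, 0 ≤ d ∧ d < 10) :
    L.Perm [1, 2, 3, 4, 5, 6, 7, 8, 9] ↔
      (L.Nodup ∧ (0 : Int) ∉ L ∧ ∀ i ∈ ([1, 2, 3, 4, 5, 6, 7, 8, 9] : List Int), i ∈ L) := by
  constructor
  · intro h
    refine ⟨h.nodup_iff.mpr (by decide), ?_, ?_⟩
    · intro h0
      have := h.mem_iff.mp h0
      simp at this
    · intro i hi
      exact h.mem_iff.mpr hi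
  · rintro ⟨hnd, h0, hall⟩
    have hsub1 : L ⊆ [1, 2, 3, 4, 5, 6, 7, 8, 9] := by
      intro d hd
      have hb' := hb d hd
      have hd0 : d ≠ 0 := fun he => h0 (he ▸ hd)
      simp only [List.mem_cons, List.not_mem_nil, or_false]
      omega
    have hsub2 : ([1, 2, 3, 4, 5, 6, 7, 8, 9] : List Int) ⊆ L := fun i hi => hall i hi
    exact (hnd.subperm hsub1).antisymm ((by decide : ([1,2,3,4,5,6,7,8,9] : List Int).Nodup).subperm hsub2)

theorem pvEligibleEq (a b c : Int) : eligible a b c = eligible_alt a b c := by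
  by_cases ha : a = 0
  · simp [eligible, eligible_alt, pvHasDups, ha]
  by_cases hb : b = 0
  · have halt : eligible_alt a b c = false := by simp [eligible_alt, hb]
    rw [halt]
    simp only [eligible, pvHasDups, ha, hb, if_false, if_true]
    by_cases h1 : (pvHasDupsLoop a PySem.Dict.empty).1 <;> simp [h1]
  by_cases hc : c = 0
  · have halt : eligible_alt a b c = false := by simp [eligible_alt, hc]
    rw [halt]
    simp only [eligible, pvHasDups, ha, hb, hc, if_false, if_true]
    by_cases h1 : (pvHasDupsLoop a PySem.Dict.empty).1
    · simp [h1]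
    · by_cases h2 : (pvHasDupsLoop b (pvHasDupsLoop a PySem.Dict.empty).2).1 <;> simp [h1, h2]
  -- main case: a, b, c all nonzero
  simp only [eligible, eligible_alt, pvHasDups, ha, hb, hc, if_false, decide_false,
    Bool.or_self, Bool.false_or, Bool.or_false, List.foldl_cons, List.foldl_nil,
    List.nil_append]
  rw [Bool.eq_iff_iff]
  simp only [Bool.false_eq_true, if_false, List.append_assoc]
  have hbnd : ∀ d ∈ (pvDigits a) ++ ((pvDigits b) ++ (pvDigits c)), 0 ≤ d ∧ d < 10 := by
    intro d hd
    simp only [List.mem_append] at hd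
    rcases hd with h | h | h
    · exact pvMemDigits_bounds a d h
    · exact pvMemDigits_bounds b d h
    · exact pvMemDigits_bounds c d h
  rw [decide_eq_true_iff, pvSortedNine, pvPermNine _ hbnd]
  set d0 : PySem.Dict Int Int := PySem.Dict.empty with hd0
  have hE : ∀ x : Int, d0.contains x = false := fun x => by
    rw [hd0]; exact PySem.Dict.contains_empty x
  obtain ⟨hA1, hA2⟩ := pvLoopSpec a d0
  by_cases h1 : (pvHasDupsLoop a d0).1
  · -- stage a detects a dup: (pvDigits a) not nodup
    simp only [h1, if_true]
    constructor
    · intro h; exact absurd h (by simp)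
    · rintro ⟨hnd, -⟩
      have : (pvHasDupsLoop a d0).1 = false := by
        rw [hA1]
        exact ⟨((List.nodup_append.mp hnd).1 : (pvDigits a).Nodup), fun d _ => hE d⟩
      rw [this] at h1; exact absurd h1 (by simp)
  · have h1f : (pvHasDupsLoop a d0).1 = false := by simpa using h1
    have hdictA := hA2 h1f
    have hAnd : (pvDigits a).Nodup := ((hA1.mp h1f).1 : (pvDigits a).Nodup)
    simp only [h1f, Bool.false_eq_true, if_false]
    set d1 := (pvHasDupsLoop a d0).2 with hd1
    have hd1c : ∀ x, d1.contains x = decide (x ∈ (pvDigits a)) := by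
      intro x; rw [hd1, hdictA x, hE x, Bool.false_or]
    obtain ⟨hB1, hB2⟩ := pvLoopSpec b d1
    by_cases h2 : (pvHasDupsLoop b d1).1
    · simp only [h2, if_true]
      constructor
      · intro h; exact absurd h (by simp)
      · rintro ⟨hnd, -⟩
        rw [List.nodup_append] at hnd
        obtain ⟨-, hnd2, hdisj⟩ := hnd
        rw [List.nodup_append] at hnd2
        have : (pvHasDupsLoop b d1).1 = false := by
          rw [hB1]
          refine ⟨hnd2.1, fun d hd => ?_⟩
          rw [hd1c d, decide_eq_false_iff_not]
          intro hmem
          exact hdisj d hmem d (List.mem_append_left _ hd) rfl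
        rw [this] at h2; exact absurd h2 (by simp)
    · have h2f : (pvHasDupsLoop b d1).1 = false := by simpa using h2
      have hdictB := hB2 h2f
      obtain ⟨hBnd, hBfresh⟩ := hB1.mp h2f
      simp only [h2f, Bool.false_eq_true, if_false]
      set d2 := (pvHasDupsLoop b d1).2 with hd2
      have hd2c : ∀ x, d2.contains x = decide (x ∈ (pvDigits a) ∨ x ∈ (pvDigits b)) := by
        intro x
        rw [hd2, hdictB x, hd1c x]
        by_cases hx : x ∈ (pvDigits a) <;> by_cases hy : x ∈ (pvDigits b) <;> simp [hx, hy]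
      obtain ⟨hC1, hC2⟩ := pvLoopSpec c d2
      by_cases h3 : (pvHasDupsLoop c d2).1
      · simp only [h3, if_true]
        constructor
        · intro h; exact absurd h (by simp)
        · rintro ⟨hnd, -⟩
          rw [List.nodup_append] at hnd
          obtain ⟨-, hnd2, hdisj⟩ := hnd
          rw [List.nodup_append] at hnd2
          obtain ⟨-, hCnd, hdisj2⟩ := hnd2
          have : (pvHasDupsLoop c d2).1 = false := by
            rw [hC1]
            refine ⟨hCnd, fun d hd => ?_⟩
            rw [hd2c d, decide_eq_false_iff_not]
            rintro (hx | hy)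
            · exact hdisj d hx d (List.mem_append_right _ hd) rfl
            · exact hdisj2 d hy d hd rfl
          rw [this] at h3; exact absurd h3 (by simp)
      · have h3f : (pvHasDupsLoop c d2).1 = false := by simpa using h3
        have hdictC := hC2 h3f
        obtain ⟨hCnd, hCfresh⟩ := hC1.mp h3f
        simp only [h3f, Bool.false_eq_true, if_false]
        set d3 := (pvHasDupsLoop c d2).2 with hd3
        have hd3c : ∀ x, d3.contains x = decide (x ∈ (pvDigits a) ++ ((pvDigits b) ++ (pvDigits c))) := by
          intro x
          rw [hd3, hdictC x, hd2c x]
          simp [List.mem_append, Bool.or_assoc]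
        have hnodup : ((pvDigits a) ++ ((pvDigits b) ++ (pvDigits c))).Nodup := by
          rw [List.nodup_append, List.nodup_append]
          refine ⟨hAnd, ⟨hBnd, hCnd, ?_⟩, ?_⟩
          · intro x hx y hy hxy
            subst hxy
            have := hCfresh x hy
            rw [hd2c x] at this
            simp only [decide_eq_false_iff_not] at this
            exact absurd (Or.inr hx) this
          · intro x hx y hy hxy
            subst hxy
            rcases List.mem_append.mp hy with hy1 | hy2
            · have := hBfresh x hy1
              rw [hd1c x] at this
              simp only [decide_eq_false_iff_not] at this
              exact absurd hx this
            · have := hCfresh x hy2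
              rw [hd2c x] at this
              simp only [decide_eq_false_iff_not] at this
              exact absurd (Or.inl hx) this
        by_cases h0 : d3.contains 0
        · simp only [h0, if_true]
          constructor
          · intro h; exact absurd h (by simp)
          · rintro ⟨-, h0', -⟩
            rw [hd3c 0, decide_eq_true_iff] at h0
            exact absurd h0 h0'
        · have h0f : d3.contains 0 = false := by simpa using h0
          simp only [h0f, Bool.false_eq_true, if_false]
          have h0mem : (0 : Int) ∉ (pvDigits a) ++ ((pvDigits b) ++ (pvDigits c)) := by
            rw [hd3c 0, decide_eq_false_iff_not] at h0f
            exact h0f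
          have hrange : PySem.List.pyRange 1 10 1 = ([1,2,3,4,5,6,7,8,9] : List Int) := by decide
          rw [hrange]
          constructor
          · intro h
            refine ⟨hnodup, h0mem, fun i hi => ?_⟩
            have := List.all_eq_true.mp h i hi
            rw [hd3c i, decide_eq_true_iff] at this
            exact this
          · rintro ⟨-, -, hall⟩
            refine List.all_eq_true.mpr fun i hi => ?_
            rw [hd3c i, decide_eq_true_iff]
            exact hall i hi

-- ===== VERDICT (by name: the statement is the Claim_ definition above) =====
theorem eligible_spec : Claim_equal_eligible := by
  intro a b c _
  unfold Spec_eligible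
  exact pvEligibleEq a b c
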